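-- pv_equiv track=rewrite | github.com/thom-heinrich/twinr | src/twinr/integrations/calendar/ics.py | _unescape_ics_text
-- ===== SOURCE A (Python) =====
-- def _unescape_ics_text(value: str) -> str:
--     """Decode iCalendar text escape sequences."""
--
--     result: list[str] = []
--     index = 0
--     while index < len(value):
--         char = value[index]
--         if char != "\\" or index + 1 >= len(value):
--             result.append(char)
--             index += 1
--             continue
--
--         escaped = value[index + 1]
--         if escaped in {"n", "N"}:
--             result.append("\n")
--         elif escaped == ",":
--             result.append(",")
--         elif escaped == ";":
--             result.append(";")
--         elif escaped == "\\":
--             result.append("\\")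
--         else:
--             result.append(escaped)
--         index += 2
--     return "".join(result)
-- ===== SOURCE B (Python) =====
-- def _unescape_ics_text(value: str) -> str:
--     """Decode iCalendar text escape sequences."""
--
--     out: list[str] = []
--     pending = False  # True iff the previous character was an unconsumed backslash
--     for ch in value:
--         if pending:
--             out.append("\n" if ch in "nN" else ch)
--             pending = False
--         elif ch == "\\":
--             pending = True
--         else:
--             out.append(ch)
--     if pending:  # trailing lone backslash falls through unchanged
--         out.append("\\")
--     return "".join(out)
-- ===== Notes on version B (the rewrite author's own statement) =====
-- stated objective: simpler
-- what changed: Replaces the index loop that peeks ahead and jumps by 1 or 2 with a single for-each state machine carrying a pending-backslash flag, and collapses the five-way elif chain into one rule (n/N -> newline, anything else -> itself).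
import Mathlib
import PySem

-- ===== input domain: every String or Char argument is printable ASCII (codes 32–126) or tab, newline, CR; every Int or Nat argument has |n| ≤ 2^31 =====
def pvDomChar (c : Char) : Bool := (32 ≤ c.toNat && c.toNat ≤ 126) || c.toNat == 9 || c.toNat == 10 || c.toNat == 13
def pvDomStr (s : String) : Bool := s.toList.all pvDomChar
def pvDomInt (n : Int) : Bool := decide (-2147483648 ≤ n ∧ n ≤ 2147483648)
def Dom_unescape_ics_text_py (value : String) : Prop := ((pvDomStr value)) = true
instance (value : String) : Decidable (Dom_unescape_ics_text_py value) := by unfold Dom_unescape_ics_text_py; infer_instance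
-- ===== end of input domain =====

-- B replaces A's index loop (look ahead, jump by 1 or 2, five-way elif chain) with a
-- one-pass for-each state machine carrying a pending-backslash flag; objective: simpler.

-- ===== PORT A =====
-- A's while loop over indices: consuming one char (no escape) or two chars (escape);
-- the elif chain on the escaped character is kept in order.
def pvUnescA : List Char → List Char
  | [] => []
  | [c] => [c]                                   -- index + 1 >= len: append char
  | c :: e :: rest =>
    if c ≠ '\\' then c :: pvUnescA (e :: rest)   -- not a backslash: append, index += 1
    else
      (if e = 'n' ∨ e = 'N' then '\n'
       else if e = ',' then ','
       else if e = ';' then ';'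
       else if e = '\\' then '\\'
       else e) :: pvUnescA rest                  -- index += 2

def unescape_ics_text_py (value : String) : String :=
  String.mk (pvUnescA value.toList)

-- ===== PORT B =====
-- B's loop body: pending flag + single replacement rule.
def pvStepB (st : List Char × Bool) (ch : Char) : List Char × Bool :=
  match st with
  | (out, true)  => (out ++ [if ch = 'n' ∨ ch = 'N' then '\n' else ch], false)
  | (out, false) => if ch = '\\' then (out, true) else (out ++ [ch], false)

def unescape_ics_text_py_alt (value : String) : String :=
  let st := value.toList.foldl pvStepB ([], false)
  String.mk (if st.2 then st.1 ++ ['\\'] else st.1)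

-- ===== PRECONDITION & SPEC =====
def Spec_unescape_ics_text_py (value : String) (out : String) : Prop := out = unescape_ics_text_py_alt value
instance (value : String) (out : String) : Decidable (Spec_unescape_ics_text_py value out) := by unfold Spec_unescape_ics_text_py; infer_instance

-- ===== CLAIM (what is proved, stated in full; the proofs are below) =====
def Claim_equal_unescape_ics_text_py : Prop := ∀ (value : String), Dom_unescape_ics_text_py value → Spec_unescape_ics_text_py value (unescape_ics_text_py value)

-- ===== LEMMAS AND PROOFS =====
def pvFinishB (st : List Char × Bool) : List Char :=
  if st.2 then st.1 ++ ['\\'] else st.1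

-- Invariant of B's state machine, both for a clean state and a pending-backslash state.
theorem pvStepB_inv (cs : List Char) : ∀ acc : List Char,
    pvFinishB (cs.foldl pvStepB (acc, false)) = acc ++ pvUnescA cs
    ∧ pvFinishB (cs.foldl pvStepB (acc, true)) = acc ++ pvUnescA ('\\' :: cs) := by
  induction cs with
  | nil => intro acc; constructor <;> simp [pvFinishB, pvUnescA]
  | cons c rest ih =>
    intro acc
    constructor
    · by_cases hc : c = '\\'
      · subst hc
        simpa [List.foldl_cons, pvStepB] using (ih acc).2
      · cases rest with
        | nil => simp [List.foldl_cons, pvStepB, hc, pvFinishB, pvUnescA]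
        | cons d ds =>
          simpa [List.foldl_cons, pvStepB, hc, pvUnescA] using (ih (acc ++ [c])).1
    · have h := (ih (acc ++ [if c = 'n' ∨ c = 'N' then '\n' else c])).1
      simp only [List.foldl_cons, pvStepB]
      simp only [pvUnescA]
      rw [h]
      have : (if c = 'n' ∨ c = 'N' then '\n'
              else if c = ',' then ','
              else if c = ';' then ';'
              else if c = '\\' then '\\'
              else c) = (if c = 'n' ∨ c = 'N' then '\n' else c) := by
        split_ifs with h1 h2 h3 h4 <;> simp_all
      simp [this]

-- ===== VERDICT (by name: the statement is the Claim_ definition above) =====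
theorem unescape_ics_text_py_spec : Claim_equal_unescape_ics_text_py := by
  intro value _
  unfold Spec_unescape_ics_text_py unescape_ics_text_py unescape_ics_text_py_alt
  have h := (pvStepB_inv value.toList []).1
  simp [pvFinishB] at h
  simp [h]
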